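-- pv_equiv track=rewrite | github.com/AlexanderJCS/advent-of-code-2023 | day-10/part_1.py | pipe_connects
-- ===== SOURCE A (Python) =====
-- def add_tuples(t1: tuple, t2: tuple):
--     return tuple(a + b for a, b, in zip(t1, t2))
--
-- def pipe_connects(
--         pipe1_chr: str, pipe1_coords: tuple,
--         pipe2_coords: tuple, offsets: dict
-- ) -> bool:
--     """
--     Used by the pipes_connect method.
--
--     :return: True if pipe_1 connects to pipe_2.
--     """
--     offset_coords = [
--         add_tuples(pipe1_coords, offset)
--         for offset in offsets[pipe1_chr]
--     ]
--
--     return pipe2_coords in offset_coords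
-- ===== SOURCE B (Python) =====
-- def pipe_connects(
--         pipe1_chr: str, pipe1_coords: tuple,
--         pipe2_coords: tuple, offsets: dict
-- ) -> bool:
--     """True if pipe_1 connects to pipe_2."""
--     delta = tuple(b - a for a, b in zip(pipe1_coords, pipe2_coords))
--     return delta in offsets[pipe1_chr]
-- ===== Notes on version B (the rewrite author's own statement) =====
-- stated objective: simpler
-- what changed: Instead of building the whole list of translated candidate coordinates and searching it, B computes the single required displacement delta = pipe2 - pipe1 and tests membership of delta in the original offset list.
import Mathlib
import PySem

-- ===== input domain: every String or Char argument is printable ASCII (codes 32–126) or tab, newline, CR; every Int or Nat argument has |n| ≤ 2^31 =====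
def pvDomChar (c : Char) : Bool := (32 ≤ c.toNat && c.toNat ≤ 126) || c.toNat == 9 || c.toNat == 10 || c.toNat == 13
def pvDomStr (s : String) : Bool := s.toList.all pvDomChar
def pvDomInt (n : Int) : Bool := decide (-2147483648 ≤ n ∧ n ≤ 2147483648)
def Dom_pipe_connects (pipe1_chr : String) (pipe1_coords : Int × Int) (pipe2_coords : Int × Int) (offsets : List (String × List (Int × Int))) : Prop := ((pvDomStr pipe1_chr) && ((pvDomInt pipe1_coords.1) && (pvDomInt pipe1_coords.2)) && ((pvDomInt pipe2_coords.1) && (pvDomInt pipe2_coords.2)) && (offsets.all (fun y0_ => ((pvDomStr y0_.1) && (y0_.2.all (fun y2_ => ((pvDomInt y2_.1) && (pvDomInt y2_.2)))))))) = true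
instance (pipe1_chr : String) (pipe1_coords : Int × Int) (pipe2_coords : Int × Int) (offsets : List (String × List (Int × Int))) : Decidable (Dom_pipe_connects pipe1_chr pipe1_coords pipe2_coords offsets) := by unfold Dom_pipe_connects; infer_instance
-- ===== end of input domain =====

-- B replaces the list of translated candidates and its search by a single displacement
-- delta = pipe2 - pipe1 looked up in the original offset list (simpler decomposition).
-- ===== PORT A =====
def add_tuples (t1 : Int × Int) (t2 : Int × Int) : Int × Int :=
  (t1.1 + t2.1, t1.2 + t2.2)

def pipe_connects (pipe1_chr : String) (pipe1_coords : Int × Int) (pipe2_coords : Int × Int) (offsets : List (String × List (Int × Int))) : Bool :=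
  let offset_coords :=
    (((PySem.Dict.mk offsets).get? pipe1_chr).getD []).map
      (fun offset => add_tuples pipe1_coords offset)
  decide (pipe2_coords ∈ offset_coords)

-- ===== PORT B =====
def pipe_connects_alt (pipe1_chr : String) (pipe1_coords : Int × Int) (pipe2_coords : Int × Int) (offsets : List (String × List (Int × Int))) : Bool :=
  let delta := (pipe2_coords.1 - pipe1_coords.1, pipe2_coords.2 - pipe1_coords.2)
  decide (delta ∈ ((PySem.Dict.mk offsets).get? pipe1_chr).getD [])

-- ===== PRECONDITION & SPEC =====
-- Pre_ excludes exactly the inputs where Python A raises KeyError: pipe1_chr absent from offsets.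
def Pre_pipe_connects (pipe1_chr : String) (pipe1_coords : Int × Int) (pipe2_coords : Int × Int) (offsets : List (String × List (Int × Int))) : Prop :=
  ((PySem.Dict.mk offsets).get? pipe1_chr).isSome = true
instance (pipe1_chr : String) (pipe1_coords : Int × Int) (pipe2_coords : Int × Int) (offsets : List (String × List (Int × Int))) : Decidable (Pre_pipe_connects pipe1_chr pipe1_coords pipe2_coords offsets) := by unfold Pre_pipe_connects; infer_instance

def pvWitness_pipe_connects : String × (Int × Int) × (Int × Int) × (List (String × List (Int × Int))) :=
  ("|", (1, 1), (2, 1), [("|", [(1, 0), (-1, 0)]), ("-", [(0, 1), (0, -1)])])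

def Spec_pipe_connects (pipe1_chr : String) (pipe1_coords : Int × Int) (pipe2_coords : Int × Int) (offsets : List (String × List (Int × Int))) (out : Bool) : Prop := out = pipe_connects_alt pipe1_chr pipe1_coords pipe2_coords offsets
instance (pipe1_chr : String) (pipe1_coords : Int × Int) (pipe2_coords : Int × Int) (offsets : List (String × List (Int × Int))) (out : Bool) : Decidable (Spec_pipe_connects pipe1_chr pipe1_coords pipe2_coords offsets out) := by unfold Spec_pipe_connects; infer_instance

-- ===== CLAIM (what is proved, stated in full; the proofs are below) =====
def Claim_equal_pipe_connects : Prop := ∀ (pipe1_chr : String) (pipe1_coords : Int × Int) (pipe2_coords : Int × Int) (offsets : List (String × List (Int × Int))), Dom_pipe_connects pipe1_chr pipe1_coords pipe2_coords offsets → Pre_pipe_connects pipe1_chr pipe1_coords pipe2_coords offsets → Spec_pipe_connects pipe1_chr pipe1_coords pipe2_coords offsets (pipe_connects pipe1_chr pipe1_coords pipe2_coords offsets)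

-- ===== LEMMAS AND PROOFS =====

-- ===== VERDICT (by name: the statement is the Claim_ definition above) =====
theorem pipe_connects_spec : Claim_equal_pipe_connects := by
  intro pipe1_chr pipe1_coords pipe2_coords offsets _ _
  unfold Spec_pipe_connects pipe_connects pipe_connects_alt add_tuples
  simp only [List.mem_map, decide_eq_decide]
  constructor
  · rintro ⟨o, ho, heq⟩
    have h1 : pipe2_coords.1 = pipe1_coords.1 + o.1 := congrArg Prod.fst heq.symm
    have h2 : pipe2_coords.2 = pipe1_coords.2 + o.2 := congrArg Prod.snd heq.symm
    have : (pipe2_coords.1 - pipe1_coords.1, pipe2_coords.2 - pipe1_coords.2) = o := by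
      obtain ⟨a, b⟩ := o; simp only [Prod.mk.injEq] at *; omega
    exact this ▸ ho
  · intro h
    refine ⟨_, h, ?_⟩
    obtain ⟨x, y⟩ := pipe2_coords; simp only [Prod.mk.injEq]; omega
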